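-- pv_equiv track=rewrite | github.com/jhlsuper/Algorithm | thisiscodingTest/implement/catchtail.py | throw
-- ===== SOURCE A (Python) =====
-- def throw(shot, teams):
--     for tpos in shot:
--         for i in range(len(teams)):
--             for idx, pos in enumerate(teams[i]):
--                 if tuple(pos) == tpos:
--                     teams[i] = teams[i][::-1]
--                     return (idx + 1) * (idx + 1)
--     return 0
-- ===== SOURCE B (Python) =====
-- def throw(shot, teams):
--     # Precompute: position -> index of its first occurrence (team-major order),
--     # then a single scan of shot with O(1) lookups.
--     first = {}
--     for team in teams:
--         for idx, pos in enumerate(team):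
--             key = tuple(pos)
--             if key not in first:
--                 first[key] = idx
--     for tpos in shot:
--         idx = first.get(tuple(tpos))
--         if idx is not None:
--             return (idx + 1) * (idx + 1)
--     return 0
-- ===== Notes on version B (the rewrite author's own statement) =====
-- stated objective: faster
-- what changed: B builds one dict mapping each position to the index of its first occurrence across teams (team-major order) and then scans shot once with O(1) lookups, replacing A's triple nested scan of all teams for every shot element.
import Mathlib
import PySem

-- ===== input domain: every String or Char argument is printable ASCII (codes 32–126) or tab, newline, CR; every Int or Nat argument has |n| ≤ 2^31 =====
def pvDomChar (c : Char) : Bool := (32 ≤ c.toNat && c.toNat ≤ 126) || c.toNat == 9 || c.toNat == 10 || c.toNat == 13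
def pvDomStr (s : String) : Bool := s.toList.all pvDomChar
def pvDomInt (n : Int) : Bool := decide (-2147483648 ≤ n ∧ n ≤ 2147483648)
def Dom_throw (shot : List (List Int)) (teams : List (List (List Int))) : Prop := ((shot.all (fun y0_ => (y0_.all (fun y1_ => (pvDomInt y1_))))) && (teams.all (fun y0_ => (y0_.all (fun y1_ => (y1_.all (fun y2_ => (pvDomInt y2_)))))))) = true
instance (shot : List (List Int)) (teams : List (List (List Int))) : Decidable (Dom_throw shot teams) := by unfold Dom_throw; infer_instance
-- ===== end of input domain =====

-- B replaces A's triple nested scan by a first-occurrence dict built once plus one scan of shot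
-- (faster); A also reverses the matched teams[i] in place on a hit while B never mutates its
-- arguments — the equivalence proved here is about the RETURN value only.

-- ===== PORT A =====
-- inner loop: for idx, pos in enumerate(teams[i]): if tuple(pos) == tpos (element-wise equality)
def throwInner (tpos : List Int) (team : List (List Int)) (idx : Int) : Option Int :=
  match team with
  | [] => none
  | pos :: rest =>
    if pos = tpos then some ((idx + 1) * (idx + 1))
    else throwInner tpos rest (idx + 1)

-- middle loop: for i in range(len(teams))
def throwTeams (tpos : List Int) (teams : List (List (List Int))) : Option Int :=
  match teams with
  | [] => none
  | team :: rest =>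
    match throwInner tpos team 0 with
    | some v => some v
    | none => throwTeams tpos rest

-- outer loop: for tpos in shot   (the 'teams[i] = teams[i][::-1]' in-place reversal happens only
-- on the returning branch and does not affect the returned value)
def throw (shot : List (List Int)) (teams : List (List (List Int))) : Int :=
  match shot with
  | [] => 0
  | tpos :: rest =>
    match throwTeams tpos teams with
    | some v => v
    | none => throw rest teams

-- ===== PORT B =====
-- for idx, pos in enumerate(team): if key not in first: first[key] = idx
def bInsertTeam (d : PySem.Dict (List Int) Int) (team : List (List Int)) (idx : Int) :
    PySem.Dict (List Int) Int :=
  match team with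
  | [] => d
  | pos :: rest =>
    bInsertTeam (if (d.get? pos).isNone then d.insert pos idx else d) rest (idx + 1)

-- for team in teams
def bBuild (d : PySem.Dict (List Int) Int) (teams : List (List (List Int))) :
    PySem.Dict (List Int) Int :=
  match teams with
  | [] => d
  | team :: rest => bBuild (bInsertTeam d team 0) rest

-- for tpos in shot: idx = first.get(tuple(tpos)); if idx is not None: return (idx+1)*(idx+1)
def bScan (d : PySem.Dict (List Int) Int) (shot : List (List Int)) : Int :=
  match shot with
  | [] => 0
  | tpos :: rest =>
    match d.get? tpos with
    | some idx => (idx + 1) * (idx + 1)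
    | none => bScan d rest

def throw_alt (shot : List (List Int)) (teams : List (List (List Int))) : Int :=
  bScan (bBuild PySem.Dict.empty teams) shot

-- ===== PRECONDITION & SPEC =====
def Spec_throw (shot : List (List Int)) (teams : List (List (List Int))) (out : Int) : Prop := out = throw_alt shot teams
instance (shot : List (List Int)) (teams : List (List (List Int))) (out : Int) : Decidable (Spec_throw shot teams out) := by unfold Spec_throw; infer_instance

-- ===== CLAIM (what is proved, stated in full; the proofs are below) =====
def Claim_equal_throw : Prop := ∀ (shot : List (List Int)) (teams : List (List (List Int))), Dom_throw shot teams → Spec_throw shot teams (throw shot teams)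

-- ===== LEMMAS AND PROOFS =====

-- spec of the inner loop of bBuild: first index of k in team, counting from idx
def firstIdxIn (k : List Int) (team : List (List Int)) (idx : Int) : Option Int :=
  match team with
  | [] => none
  | pos :: rest => if pos = k then some idx else firstIdxIn k rest (idx + 1)

def firstIdx (k : List Int) (teams : List (List (List Int))) : Option Int :=
  match teams with
  | [] => none
  | team :: rest =>
    match firstIdxIn k team 0 with
    | some v => some v
    | none => firstIdx k rest

theorem throwInner_eq_map (tpos : List Int) (team : List (List Int)) (idx : Int) :
    throwInner tpos team idx = (firstIdxIn tpos team idx).map (fun i => (i + 1) * (i + 1)) := by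
  induction team generalizing idx with
  | nil => rfl
  | cons pos rest ih =>
    by_cases h : pos = tpos
    · simp [throwInner, firstIdxIn, h]
    · simp [throwInner, firstIdxIn, h, ih]

theorem throwTeams_eq_map (tpos : List Int) (teams : List (List (List Int))) :
    throwTeams tpos teams = (firstIdx tpos teams).map (fun i => (i + 1) * (i + 1)) := by
  induction teams with
  | nil => rfl
  | cons team rest ih =>
    simp only [throwTeams, firstIdx, throwInner_eq_map]
    cases firstIdxIn tpos team 0 with
    | none => simp [ih]
    | some v => simp

theorem bInsertTeam_get? (k : List Int) (team : List (List Int))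
    (d : PySem.Dict (List Int) Int) (idx : Int) :
    (bInsertTeam d team idx).get? k =
      ((d.get? k).orElse (fun _ => firstIdxIn k team idx)) := by
  induction team generalizing d idx with
  | nil => cases h : d.get? k <;> simp [bInsertTeam, firstIdxIn, Option.orElse, h]
  | cons pos rest ih =>
    simp only [bInsertTeam, firstIdxIn, ih]
    by_cases hk : pos = k
    · subst hk
      cases h : d.get? pos with
      | none => simp [PySem.Dict.get?_insert_self, Option.orElse]
      | some v => simp [h, Option.orElse]
    · cases h : d.get? pos with
      | none => simp [PySem.Dict.get?_insert, hk, Ne.symm hk]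
      | some v => simp [hk]

theorem bBuild_get? (k : List Int) (teams : List (List (List Int)))
    (d : PySem.Dict (List Int) Int) :
    (bBuild d teams).get? k = ((d.get? k).orElse (fun _ => firstIdx k teams)) := by
  induction teams generalizing d with
  | nil => cases h : d.get? k <;> simp [bBuild, firstIdx, Option.orElse, h]
  | cons team rest ih =>
    simp only [bBuild, firstIdx, ih, bInsertTeam_get?]
    cases d.get? k with
    | some v => simp [Option.orElse]
    | none =>
      cases firstIdxIn k team 0 <;> simp [Option.orElse]

theorem bBuild_empty_get? (k : List Int) (teams : List (List (List Int))) :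
    (bBuild PySem.Dict.empty teams).get? k = firstIdx k teams := by
  rw [bBuild_get?]
  simp [PySem.Dict.get?_empty, Option.orElse]

theorem throw_eq_alt (shot : List (List Int)) (teams : List (List (List Int))) :
    throw shot teams = bScan (bBuild PySem.Dict.empty teams) shot := by
  induction shot with
  | nil => rfl
  | cons tpos rest ih =>
    show (match throwTeams tpos teams with | some v => v | none => throw rest teams) =
      bScan (bBuild PySem.Dict.empty teams) (tpos :: rest)
    rw [throwTeams_eq_map]
    simp only [bScan, bBuild_empty_get?]
    cases firstIdx tpos teams with
    | none => exact ih
    | some v => simp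

-- ===== VERDICT (by name: the statement is the Claim_ definition above) =====
theorem throw_spec : Claim_equal_throw := by
  intro shot teams _
  exact throw_eq_alt shot teams
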